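-- pv_equiv track=rewrite | github.com/joshvdb/Summary-Generator | summary_generation.py | full_summarizer_word_comparison
-- ===== SOURCE A (Python) =====
-- def full_summarizer_word_comparison(sentences, topic_sentences, number_topics):
--     """
--     Function to obtain a summary from a larger text, based on the similarity between the sentences of the text and the
--     list of topic sentences, obtained from a summary generation method.
--
--     :param sentences: [str]
--     :param topic_sentences: [str]
--     :param number_topics: int
--     :return: [str]
--     """
--
--     word_counts = []
--
--     for sentence in sentences:
--         document_1_words = sentence.split()
--         document_2_words = ''.join(topic_sentences).split()
--
--         common_words = set(document_1_words).intersection(set(document_2_words))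
--         word_counts.append(len(common_words))
--
--     return [j for i, j in sorted(list(zip(word_counts, sentences)), reverse=True)][0:number_topics]
-- ===== SOURCE B (Python) =====
-- def full_summarizer_word_comparison(sentences, topic_sentences, number_topics):
--     """One-pass online ranking: build the topic word set once, then maintain a
--     descending-ordered ranked list by ordered insertion as each sentence is
--     scored, instead of scoring everything first and sorting the whole list."""
--     topic_words = set(''.join(topic_sentences).split())
--
--     def insert_desc(ranked, item):
--         # insert item before the first strictly smaller entry (stable, descending)
--         for i, r in enumerate(ranked):
--             if item > r:
--                 return ranked[:i] + [item] + ranked[i:]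
--         return ranked + [item]
--
--     ranked = []
--     for s in sentences:
--         ranked = insert_desc(ranked, (len(set(s.split()) & topic_words), s))
--     return [s for _, s in ranked[:number_topics]]
-- ===== Notes on version B (the rewrite author's own statement) =====
-- stated objective: alternative
-- what changed: B replaces A's staged pipeline (score list, zip, library sort, slice) by a single online pass that inserts each (score, sentence) pair into a descending-ordered ranked list as it is scored, with the topic word set built once instead of re-joined and re-split for every sentence.
import Mathlib
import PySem

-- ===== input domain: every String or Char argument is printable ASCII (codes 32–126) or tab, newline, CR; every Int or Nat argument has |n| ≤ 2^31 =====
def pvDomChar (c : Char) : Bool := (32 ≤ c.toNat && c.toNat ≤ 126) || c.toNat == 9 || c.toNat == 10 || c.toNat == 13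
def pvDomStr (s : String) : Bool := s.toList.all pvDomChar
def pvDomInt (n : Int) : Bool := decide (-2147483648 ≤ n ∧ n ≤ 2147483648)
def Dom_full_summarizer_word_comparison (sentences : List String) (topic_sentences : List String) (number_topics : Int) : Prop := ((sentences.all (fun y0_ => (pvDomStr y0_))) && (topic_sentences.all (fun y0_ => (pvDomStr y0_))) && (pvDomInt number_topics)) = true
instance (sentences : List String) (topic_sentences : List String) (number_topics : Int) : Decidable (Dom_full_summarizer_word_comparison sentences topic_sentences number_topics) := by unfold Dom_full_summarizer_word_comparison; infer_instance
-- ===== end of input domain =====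

-- B replaces A's staged pipeline (score list, zip, library sort, slice) by one online pass that
-- inserts each (score, sentence) pair into a descending-ordered ranked list; same return value.

-- ===== PORT A =====
def full_summarizer_word_comparison (sentences : List String) (topic_sentences : List String) (number_topics : Int) : List String :=
  let word_counts : List Int := sentences.foldl (fun acc sentence =>
    let document_1_words := PySem.Str.split₀ sentence
    let document_2_words := PySem.Str.split₀ (PySem.Str.join "" topic_sentences)
    let common_words := PySem.Set.inter (PySem.Set.ofList document_1_words) (PySem.Set.ofList document_2_words)
    acc ++ [(PySem.Set.len common_words : Int)]) []
  PySem.List.slice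
    ((PySem.List.sorted2 (word_counts.zip sentences) (fun p => p.1) (fun p => p.2) true).map (fun p => p.2))
    (some 0) (some number_topics)

-- ===== PORT B =====
-- insert_desc: walk ranked, insert item before the first strictly smaller entry (Python tuple '>')
def pvInsertDesc (item : Int × String) : List (Int × String) → List (Int × String)
  | [] => [item]
  | r :: rs => if r.1 < item.1 ∨ (r.1 = item.1 ∧ r.2 < item.2) then item :: r :: rs
               else r :: pvInsertDesc item rs

def full_summarizer_word_comparison_alt (sentences : List String) (topic_sentences : List String) (number_topics : Int) : List String :=
  let topic_words := PySem.Set.ofList (PySem.Str.split₀ (PySem.Str.join "" topic_sentences))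
  let ranked : List (Int × String) := sentences.foldl (fun ranked s =>
    pvInsertDesc ((PySem.Set.len (PySem.Set.inter (PySem.Set.ofList (PySem.Str.split₀ s)) topic_words) : Int), s) ranked) []
  (PySem.List.slice ranked none (some number_topics)).map (fun p => p.2)

-- ===== PRECONDITION & SPEC =====
def Spec_full_summarizer_word_comparison (sentences : List String) (topic_sentences : List String) (number_topics : Int) (out : List String) : Prop := out = full_summarizer_word_comparison_alt sentences topic_sentences number_topics
instance (sentences : List String) (topic_sentences : List String) (number_topics : Int) (out : List String) : Decidable (Spec_full_summarizer_word_comparison sentences topic_sentences number_topics out) := by unfold Spec_full_summarizer_word_comparison; infer_instance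

-- ===== CLAIM (what is proved, stated in full; the proofs are below) =====
def Claim_equal_full_summarizer_word_comparison : Prop := ∀ (sentences : List String) (topic_sentences : List String) (number_topics : Int), Dom_full_summarizer_word_comparison sentences topic_sentences number_topics → Spec_full_summarizer_word_comparison sentences topic_sentences number_topics (full_summarizer_word_comparison sentences topic_sentences number_topics)

-- ===== LEMMAS AND PROOFS =====

-- B's hand-written ordered insert is PySem's insertBy with sorted2's reverse=True comparator
theorem pvInsertDesc_eq_insertBy (item : Int × String) (l : List (Int × String)) :
    pvInsertDesc item l
      = PySem.List.insertBy
          (fun a b => decide (b.1 < a.1) || !decide (a.1 < b.1) && decide (b.2 < a.2)) item l := by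
  induction l with
  | nil => rfl
  | cons r rs ih =>
    have hc : (r.1 < item.1 ∨ (r.1 = item.1 ∧ r.2 < item.2))
        ↔ (decide (r.1 < item.1) || !decide (item.1 < r.1) && decide (r.2 < item.2)) = true := by
      rcases lt_trichotomy r.1 item.1 with h|h|h
      · simp [h]
      · simp [h]
      · simp [asymm h, h]
        exact fun hh => absurd (hh ▸ h) (lt_irrefl _)
    show (if r.1 < item.1 ∨ (r.1 = item.1 ∧ r.2 < item.2) then item :: r :: rs
          else r :: pvInsertDesc item rs) = _
    rw [PySem.List.insertBy, ih, if_congr hc rfl rfl]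

-- map commutes with a Python slice (the slice bounds only look at the length)
theorem pv_slice_map {α β : Type} (f : α → β) (xs : List α) (a? b? : Option Int) :
    PySem.List.slice (xs.map f) a? b? = (PySem.List.slice xs a? b?).map f := by
  simp [PySem.List.slice, PySem.List.clampIdx, List.map_drop, List.map_take]

theorem pv_zip_map {α β : Type} (f : α → β) (l : List α) :
    (l.map f).zip l = l.map (fun x => (f x, x)) := by
  induction l with
  | nil => rfl
  | cons x t ih => simp [ih]

theorem full_summarizer_word_comparison_eq (sentences topic_sentences : List String) (number_topics : Int) :
    full_summarizer_word_comparison sentences topic_sentences number_topics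
      = full_summarizer_word_comparison_alt sentences topic_sentences number_topics := by
  unfold full_summarizer_word_comparison full_summarizer_word_comparison_alt
  simp only [PySem.List.foldl_append_singleton_eq_map, List.nil_append, pv_zip_map,
    pv_slice_map, PySem.List.slice_zero_start, PySem.List.sorted2, List.foldl_map, reduceIte,
    pvInsertDesc_eq_insertBy]

-- ===== VERDICT (by name: the statement is the Claim_ definition above) =====
theorem full_summarizer_word_comparison_spec : Claim_equal_full_summarizer_word_comparison := by
  intro s t n _
  exact full_summarizer_word_comparison_eq s t n
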